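-- pv_equiv track=rewrite | github.com/elite3312/leet_code_practice | solutions/easy/950_reveal_cards_in_increasing_order.py | f_inverse
-- ===== SOURCE A (Python) =====
-- def f_inverse(revealed_deck: list):
--     expected_deck = []
--     n=len(revealed_deck)
--     while (1):
--         if len(expected_deck)==n:break
--
--         if len(expected_deck) > 0:
--             bottom = expected_deck.pop(-1)
--             expected_deck.insert(0, bottom)
--         if len(revealed_deck) == 0:
--             break
--         top = revealed_deck.pop(-1)
--         expected_deck.insert(0, top)
--     return expected_deck
-- ===== SOURCE B (Python) =====
-- from collections import deque
--
-- def f_inverse(revealed_deck: list):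
--     # Forward simulation with an index queue (also empties revealed_deck,
--     # matching A's in-place consumption of the argument).
--     n = len(revealed_deck)
--     res = [0] * n
--     idx = deque(range(n))
--     while revealed_deck:
--         card = revealed_deck.pop(0)
--         res[idx.popleft()] = card
--         if idx:
--             idx.append(idx.popleft())
--     return res
-- ===== Notes on version B (the rewrite author's own statement) =====
-- stated objective: idiomatic
-- what changed: B replaces A's backward reconstruction (repeatedly rotating the whole growing deck via pop/insert and prepending cards taken from the end) with the standard forward simulation: an index deque deals out final positions while one pass over the revealed cards drops each card directly into its final slot.
import Mathlib
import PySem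

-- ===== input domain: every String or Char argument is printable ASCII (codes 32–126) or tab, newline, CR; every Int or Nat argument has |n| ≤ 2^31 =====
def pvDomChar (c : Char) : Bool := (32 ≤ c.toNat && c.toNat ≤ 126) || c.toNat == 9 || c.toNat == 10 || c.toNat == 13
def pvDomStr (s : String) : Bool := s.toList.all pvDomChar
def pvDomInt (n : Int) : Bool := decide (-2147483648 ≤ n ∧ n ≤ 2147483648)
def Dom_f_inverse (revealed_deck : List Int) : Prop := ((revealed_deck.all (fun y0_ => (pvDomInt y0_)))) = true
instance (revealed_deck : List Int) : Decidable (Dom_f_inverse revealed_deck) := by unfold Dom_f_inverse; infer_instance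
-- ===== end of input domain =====

-- B replaces A's backward whole-deck rotation with the standard forward index-queue deal;
-- equivalence is about the return value (both Pythons also empty revealed_deck in place).

-- ===== PORT A =====
-- literal port of A's while-loop: state (expected, revealed), peeling revealed from the back
def f_inverse_loop (n : Nat) (expected revealed : List Int) : List Int :=
  if expected.length = n then expected
  else
    let e := if 0 < expected.length then expected.getLast! :: expected.dropLast else expected
    if hne : revealed.isEmpty then e
    else f_inverse_loop n (revealed.getLast! :: e) revealed.dropLast
termination_by revealed.length
decreasing_by
  have h1 : revealed ≠ [] := by simpa using hne
  have h2 : revealed.dropLast.length = revealed.length - 1 := List.length_dropLast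
  have h3 : revealed.length ≠ 0 := fun hz => h1 (List.eq_nil_of_length_eq_zero hz)
  omega

def f_inverse (revealed_deck : List Int) : List Int :=
  f_inverse_loop revealed_deck.length [] revealed_deck

-- ===== PORT B =====
-- literal port of B's while-loop: res[idx.popleft()] = card; rotate the index deque
def pvLoopB (res : List Int) (q : List Nat) (cards : List Int) : List Int :=
  match cards with
  | [] => res
  | c :: cs =>
    match q with
    | [] => res          -- unreachable: the queue always holds as many indices as cards remain
    | p :: q' =>
      let res' := res.set p c
      let q'' := match q' with
        | [] => ([] : List Nat)
        | p2 :: rest => rest ++ [p2]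
      pvLoopB res' q'' cs

def f_inverse_alt (revealed_deck : List Int) : List Int :=
  pvLoopB (List.replicate revealed_deck.length 0) (List.range revealed_deck.length) revealed_deck

-- ===== PRECONDITION & SPEC =====
def Spec_f_inverse (revealed_deck : List Int) (out : List Int) : Prop := out = f_inverse_alt revealed_deck
instance (revealed_deck : List Int) (out : List Int) : Decidable (Spec_f_inverse revealed_deck out) := by unfold Spec_f_inverse; infer_instance

-- ===== CLAIM (what is proved, stated in full; the proofs are below) =====
def Claim_equal_f_inverse : Prop := ∀ (revealed_deck : List Int), Dom_f_inverse revealed_deck → Spec_f_inverse revealed_deck (f_inverse revealed_deck)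

-- ===== LEMMAS AND PROOFS =====

-- "rotate one card from the top to the bottom", and the reveal process itself
def pvRotF {α : Type} : List α → List α
  | [] => []
  | x :: xs => xs ++ [x]

theorem pvRotF_length {α : Type} (l : List α) : (pvRotF l).length = l.length := by
  cases l <;> simp [pvRotF]

def pvReveal {α : Type} : List α → List α
  | [] => []
  | x :: xs => x :: pvReveal (pvRotF xs)
termination_by l => l.length
decreasing_by simp [pvRotF_length]

theorem pvReveal_length {α : Type} (l : List α) : (pvReveal l).length = l.length := by
  induction l using pvReveal.induct with
  | case1 => simp [pvReveal]
  | case2 x xs ih => simp [pvReveal, ih, pvRotF_length]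

theorem pvRotF_perm {α : Type} (l : List α) : List.Perm (pvRotF l) l := by
  cases l with
  | nil => simp [pvRotF]
  | cons x xs => simpa [pvRotF] using (List.perm_append_singleton x xs)

theorem pvReveal_perm {α : Type} (l : List α) : List.Perm (pvReveal l) l := by
  induction l using pvReveal.induct with
  | case1 => simp [pvReveal]
  | case2 x xs ih =>
    simpa [pvReveal] using (ih.trans (pvRotF_perm xs)).cons x

theorem pvRotF_map {α β : Type} (f : α → β) (l : List α) :
    pvRotF (l.map f) = (pvRotF l).map f := by
  cases l <;> simp [pvRotF]

theorem pvReveal_map {α β : Type} (f : α → β) (l : List α) :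
    pvReveal (l.map f) = (pvReveal l).map f := by
  induction l using pvReveal.induct with
  | case1 => simp [pvReveal]
  | case2 x xs ih => simp [pvReveal, pvRotF_map, ih]

theorem pv_getLast!_concat (l : List Int) (a : Int) : (l ++ [a]).getLast! = a := by
  simp [List.getLast!_eq_getLast?_getD]

-- undoing A's bottom-to-top rotation with a top-to-bottom rotation
theorem pvRotF_rotA (e : List Int) :
    pvRotF (if 0 < e.length then e.getLast! :: e.dropLast else e) = e := by
  cases e using List.reverseRecOn with
  | nil => simp [pvRotF]
  | append_singleton l a => simp [pvRotF]

theorem rotA_length (e : List Int) :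
    (if 0 < e.length then e.getLast! :: e.dropLast else e).length = e.length := by
  cases e using List.reverseRecOn with
  | nil => simp
  | append_singleton l a => simp

-- A's loop, revealed: revealing its result yields the consumed cards followed by reveal of the start state
theorem f_inverse_loop_reveal (n : Nat) :
    ∀ (r e : List Int), e.length + r.length = n →
      pvReveal (f_inverse_loop n e r) = r ++ pvReveal e := by
  intro r
  induction r using List.reverseRecOn with
  | nil =>
    intro e he
    unfold f_inverse_loop
    simp at he
    simp [he]
  | append_singleton l a ih =>
    intro e he
    have hEl : e.length + (l.length + 1) = n := by simpa using he
    have hlen : e.length ≠ n := by omega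
    have hrec := ih ((l ++ [a]).getLast! :: (if 0 < e.length then e.getLast! :: e.dropLast else e))
      (by rw [List.length_cons, rotA_length]; omega)
    unfold f_inverse_loop
    rw [if_neg hlen, dif_neg (by simp), List.dropLast_concat, hrec, pv_getLast!_concat,
      pvReveal, pvRotF_rotA]
    simp

theorem f_inverse_reveal (cs : List Int) : pvReveal (f_inverse cs) = cs := by
  have := f_inverse_loop_reveal cs.length cs [] (by simp)
  simpa [f_inverse, pvReveal] using this

theorem f_inverse_length (cs : List Int) : (f_inverse cs).length = cs.length := by
  have := congrArg List.length (f_inverse_reveal cs)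
  simpa [pvReveal_length] using this

-- B's loop only writes at positions in its queue
theorem pvLoopB_not_mem :
    ∀ (cs : List Int) (q : List Nat) (res : List Int) (p : Nat), p ∉ q →
      (pvLoopB res q cs).getD p 0 = res.getD p 0 := by
  intro cs
  induction cs with
  | nil => intro q res p _; rfl
  | cons c cs ih =>
    intro q res p hp
    cases q with
    | nil => rfl
    | cons p' q' =>
      simp only [List.mem_cons, not_or] at hp
      have hne : p ≠ p' := hp.1
      have hnotq' : p ∉ q' := hp.2
      show (pvLoopB (res.set p' c) _ cs).getD p 0 = _
      cases q' with
      | nil =>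
        rw [ih [] (res.set p' c) p (by simp)]
        simp [List.getD, List.getElem?_set_ne (Ne.symm hne)]
      | cons p2 rest =>
        rw [ih (rest ++ [p2]) (res.set p' c) p (by
          simp only [List.mem_cons, not_or] at hnotq'
          simp [hnotq'.1, hnotq'.2])]
        simp [List.getD, List.getElem?_set_ne (Ne.symm hne)]

-- the values of B's result, read back in deal order, are the cards in their original order
theorem pvLoopB_vals :
    ∀ (cs : List Int) (q : List Nat) (res : List Int),
      q.Nodup → q.length = cs.length → (∀ p ∈ q, p < res.length) →
      (pvReveal q).map (fun p => (pvLoopB res q cs).getD p 0) = cs := by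
  intro cs
  induction cs with
  | nil =>
    intro q res _ hlen _
    have : q = [] := List.eq_nil_of_length_eq_zero (by simpa using hlen)
    subst this; simp [pvReveal]
  | cons c cs ih =>
    intro q res hnd hlen hb
    cases q with
    | nil => simp at hlen
    | cons p q' =>
      have hq'' : pvLoopB res (p :: q') (c :: cs) =
          pvLoopB (res.set p c) (pvRotF q') cs := by
        cases q' <;> rfl
      rw [pvReveal, hq'']
      have hnd' : (pvRotF q').Nodup := ((pvRotF_perm q').nodup_iff).2 (List.Nodup.of_cons hnd)
      have hpq : p ∉ q' := by
        have := List.nodup_cons.1 hnd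
        exact this.1
      have hpq' : p ∉ pvRotF q' := fun h => hpq ((pvRotF_perm q').mem_iff.1 h)
      have hlen' : (pvRotF q').length = cs.length := by
        simp [pvRotF_length]; simpa using hlen
      have hb' : ∀ x ∈ pvRotF q', x < (res.set p c).length := by
        intro x hx
        have : x ∈ q' := (pvRotF_perm q').mem_iff.1 hx
        simpa using hb x (by simp [this])
      have htail := ih (pvRotF q') (res.set p c) hnd' hlen' hb'
      simp only [List.map_cons, htail]
      congr 1
      rw [pvLoopB_not_mem cs (pvRotF q') (res.set p c) p hpq']
      have hp : p < res.length := hb p (by simp)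
      simp [List.getD, List.getElem?_set_self hp]

theorem pvLoopB_length :
    ∀ (cs : List Int) (q : List Nat) (res : List Int), (pvLoopB res q cs).length = res.length := by
  intro cs
  induction cs with
  | nil => intro q res; rfl
  | cons c cs ih =>
    intro q res
    cases q with
    | nil => rfl
    | cons p q' => cases q' <;> simp [pvLoopB, ih]

-- any list is the map of its reads over range of its length
theorem map_getD_range (R : List Int) :
    (List.range R.length).map (fun p => R.getD p 0) = R := by
  apply List.ext_getElem
  · simp
  · intro i h1 h2
    simp [List.getD_eq_getElem?_getD, List.getElem?_eq_getElem h2]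

theorem f_inverse_alt_length (cs : List Int) : (f_inverse_alt cs).length = cs.length := by
  simp [f_inverse_alt, pvLoopB_length]

theorem f_inverse_alt_reveal (cs : List Int) : pvReveal (f_inverse_alt cs) = cs := by
  have hlen := f_inverse_alt_length cs
  have hself : (List.range (f_inverse_alt cs).length).map (fun p => (f_inverse_alt cs).getD p 0)
      = f_inverse_alt cs := map_getD_range _
  rw [hlen] at hself
  calc pvReveal (f_inverse_alt cs)
      = pvReveal ((List.range cs.length).map (fun p => (f_inverse_alt cs).getD p 0)) := by rw [hself]
    _ = (pvReveal (List.range cs.length)).map (fun p => (f_inverse_alt cs).getD p 0) :=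
        pvReveal_map _ _
    _ = cs := by
        exact pvLoopB_vals cs (List.range cs.length) (List.replicate cs.length 0)
          (List.nodup_range) (by simp) (by intro p hp; simpa using List.mem_range.1 hp)

-- reveal is injective on same-length lists; hence A = B
theorem reveal_inj (A B : List Int) (hlen : A.length = B.length)
    (h : pvReveal A = pvReveal B) : A = B := by
  have hA := map_getD_range A
  have hB := map_getD_range B
  rw [hlen] at hA
  have hmap : (pvReveal (List.range B.length)).map (fun p => A.getD p 0)
      = (pvReveal (List.range B.length)).map (fun p => B.getD p 0) := by
    rw [← pvReveal_map, ← pvReveal_map, hA, hB, h]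
  have hpt : ∀ p ∈ pvReveal (List.range B.length), A.getD p 0 = B.getD p 0 := by
    rw [List.map_inj_left] at hmap
    exact hmap
  have : (List.range B.length).map (fun p => A.getD p 0)
      = (List.range B.length).map (fun p => B.getD p 0) := by
    apply List.map_congr_left
    intro p hp
    exact hpt p (((pvReveal_perm _).mem_iff).2 hp)
  rw [hA] at this; rw [hB] at this; exact this

-- ===== VERDICT (by name: the statement is the Claim_ definition above) =====
theorem f_inverse_spec : Claim_equal_f_inverse := by
  intro cs _
  unfold Spec_f_inverse
  exact reveal_inj _ _ (by rw [f_inverse_length, f_inverse_alt_length])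
    (by rw [f_inverse_reveal, f_inverse_alt_reveal])
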